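-- pv_equiv track=rewrite | github.com/mikeb55/creative-engines | engines/composition_evaluator/motif_coherence.py | _events_to_intervals
-- ===== SOURCE A (Python) =====
-- from typing import Any, Dict, List, Tuple
--
-- def _events_to_intervals(events: List[Dict]) -> List[int]:
--     if len(events) < 2:
--         return []
--     out = []
--     prev = events[0].get("pitch", 60)
--     for e in events[1:]:
--         p = e.get("pitch", prev)
--         out.append(p - prev)
--         prev = p
--     return out
-- ===== SOURCE B (Python) =====
-- from typing import Any, Dict, List, Tuple
--
-- def _resolved(events: List[Dict], i: int) -> int:
--     # pitch in effect at index i: last explicit "pitch" in events[:i+1], else 60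
--     for e in reversed(events[:i + 1]):
--         if "pitch" in e:
--             return e["pitch"]
--     return 60
--
-- def _events_to_intervals(events: List[Dict]) -> List[int]:
--     if len(events) < 2:
--         return []
--     return [_resolved(events, i + 1) - _resolved(events, i)
--             for i in range(len(events) - 1)]
-- ===== Notes on version B (the rewrite author's own statement) =====
-- stated objective: alternative
-- what changed: B is stateless and index-based: for each position it recomputes the pitch in effect by a backward scan of the prefix for the last explicit pitch (default 60 only if none), and returns the per-index differences over range(n-1), instead of A's single forward pass carrying a running prev.
import Mathlib
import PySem

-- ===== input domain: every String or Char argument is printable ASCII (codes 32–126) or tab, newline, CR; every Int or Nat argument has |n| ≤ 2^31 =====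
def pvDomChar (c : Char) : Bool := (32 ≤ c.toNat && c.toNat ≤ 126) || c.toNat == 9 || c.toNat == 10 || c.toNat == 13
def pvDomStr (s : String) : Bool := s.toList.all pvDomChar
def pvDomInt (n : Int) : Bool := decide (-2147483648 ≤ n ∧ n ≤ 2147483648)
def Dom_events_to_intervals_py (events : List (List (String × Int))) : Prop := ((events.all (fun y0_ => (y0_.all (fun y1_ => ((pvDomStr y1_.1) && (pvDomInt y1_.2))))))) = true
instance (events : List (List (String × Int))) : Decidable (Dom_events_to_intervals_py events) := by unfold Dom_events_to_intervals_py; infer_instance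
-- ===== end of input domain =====

-- Header: B replaces A's stateful forward pass by a stateless per-index formula (backward prefix
-- scan for the last explicit pitch, zip of nothing): an alternative decomposition, not faster.

-- Python e.get("pitch", dflt) on an association list (first match)
def getPitch (e : List (String × Int)) (dflt : Int) : Int :=
  ((e.find? (fun kv => kv.1 == "pitch")).map (·.2)).getD dflt

-- ===== PORT A =====
def events_to_intervals_py (events : List (List (String × Int))) : List Int :=
  if events.length < 2 then []
  else
    match events with
    | [] => []
    | e0 :: rest =>
      (rest.foldl (fun (acc : List Int × Int) e =>
        let p := getPitch e acc.2
        (acc.1 ++ [p - acc.2], p)) ([], getPitch e0 60)).1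

-- ===== PORT B =====
-- _resolved: scan reversed(events[:i+1]) for the first event carrying "pitch", else 60
def resolvedPitch (events : List (List (String × Int))) (i : Nat) : Int :=
  (((events.take (i + 1)).reverse).findSome?
      (fun e => (e.find? (fun kv => kv.1 == "pitch")).map (·.2))).getD 60

def events_to_intervals_py_alt (events : List (List (String × Int))) : List Int :=
  if events.length < 2 then []
  else
    (List.range (events.length - 1)).map
      (fun i => resolvedPitch events (i + 1) - resolvedPitch events i)

-- ===== PRECONDITION & SPEC =====
def Spec_events_to_intervals_py (events : List (List (String × Int))) (out : List Int) : Prop := out = events_to_intervals_py_alt events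
instance (events : List (List (String × Int))) (out : List Int) : Decidable (Spec_events_to_intervals_py events out) := by unfold Spec_events_to_intervals_py; infer_instance

-- ===== CLAIM (what is proved, stated in full; the proofs are below) =====
def Claim_equal_events_to_intervals_py : Prop := ∀ (events : List (List (String × Int))), Dom_events_to_intervals_py events → Spec_events_to_intervals_py events (events_to_intervals_py events)

-- ===== LEMMAS AND PROOFS =====

-- canonical forward-fill intervals
def gInt (prev : Int) : List (List (String × Int)) → List Int
  | [] => []
  | e :: es => let p := getPitch e prev; (p - prev) :: gInt p es

-- A's fold equals acc ++ gInt
theorem foldl_eq_g (rest : List (List (String × Int))) :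
    ∀ (prev : Int) (acc : List Int),
    (rest.foldl (fun (st : List Int × Int) e =>
        let p := getPitch e st.2
        (st.1 ++ [p - st.2], p)) (acc, prev)).1
      = acc ++ gInt prev rest := by
  induction rest with
  | nil => intro prev acc; simp [gInt]
  | cons e es ih =>
    intro prev acc
    simp only [List.foldl, gInt]
    rw [ih]
    simp

theorem resolved_zero (e0 : List (String × Int)) (rest : List (List (String × Int))) :
    resolvedPitch (e0 :: rest) 0 = getPitch e0 60 := by
  simp [resolvedPitch, getPitch]

theorem resolved_succ (events : List (List (String × Int))) (i : Nat)
    (h : i + 1 < events.length) :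
    resolvedPitch events (i + 1) = getPitch events[i + 1] (resolvedPitch events i) := by
  unfold resolvedPitch
  rw [List.take_add_one, List.getElem?_eq_getElem h]
  simp only [Option.toList_some, List.reverse_append, List.reverse_cons, List.reverse_nil,
    List.nil_append, List.cons_append, List.findSome?]
  unfold getPitch
  cases events[i+1].find? (fun kv => kv.1 == "pitch") <;> simp

-- a sequence satisfying the forward-fill recurrence has gInt as its difference list
theorem range_map_eq_g (rest : List (List (String × Int))) :
    ∀ (r : Nat → Int),
    (∀ i (h : i < rest.length), r (i + 1) = getPitch rest[i] (r i)) →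
    (List.range rest.length).map (fun i => r (i + 1) - r i) = gInt (r 0) rest := by
  induction rest with
  | nil => intro r _; simp [gInt]
  | cons e es ih =>
    intro r hr
    have h0 : r 1 = getPitch e (r 0) := by
      simpa using hr 0 (by simp)
    simp only [List.length_cons]
    rw [List.range_succ_eq_map]
    simp only [List.map_cons, List.map_map, gInt]
    rw [← h0]
    congr 1
    have := ih (fun j => r (j + 1)) (by
      intro i h
      simpa using hr (i + 1) (by simpa using Nat.succ_lt_succ h))
    simpa [Function.comp] using this

-- ===== VERDICT (by name: the statement is the Claim_ definition above) =====
theorem events_to_intervals_py_spec : Claim_equal_events_to_intervals_py := by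
  unfold Claim_equal_events_to_intervals_py
  intro events _
  unfold Spec_events_to_intervals_py events_to_intervals_py events_to_intervals_py_alt
  split
  · rfl
  · match events with
    | [] => rfl
    | e0 :: rest =>
      show (rest.foldl (fun (acc : List Int × Int) e =>
        let p := getPitch e acc.2
        (acc.1 ++ [p - acc.2], p)) ([], getPitch e0 60)).1 = _
      rw [foldl_eq_g, List.nil_append]
      have hlen : (e0 :: rest).length - 1 = rest.length := by simp
      rw [hlen]
      have hrec : ∀ i (h : i < rest.length),
          resolvedPitch (e0 :: rest) (i + 1) = getPitch rest[i] (resolvedPitch (e0 :: rest) i) := by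
        intro i h
        have h' : i + 1 < (e0 :: rest).length := by simp; omega
        simpa using resolved_succ (e0 :: rest) i h'
      rw [range_map_eq_g rest (fun i => resolvedPitch (e0 :: rest) i) hrec, resolved_zero]
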